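-- pv_equiv track=rewrite | github.com/venkatmiriyala19/GeeksForGeeks | Reversing the equation.py | reverseEqn
-- ===== SOURCE A (Python) =====
-- def reverseEqn(s):
--     s1=''
--     s2='0'
--     s3=''
--     a=[]
--     for i in s:
--         if i in '+-*/':
--             s2+=i
--             a.append(s1)
--             s1=''
--         else:
--             s1+=i
--     a.append(s1)
--     for i in range(1,len(a)):
--         s3+=a[-i]+s2[-i]
--     s3+=a[0]
--     return s3
-- ===== SOURCE B (Python) =====
-- def reverseEqn(s):
--     for k, ch in enumerate(s):
--         if ch in '+-*/':
--             return reverseEqn(s[k + 1:]) + ch + s[:k]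
--     return s
-- ===== Notes on version B (the rewrite author's own statement) =====
-- stated objective: simpler
-- what changed: B is a 5-line recursion: split at the first operator and return reverseEqn(suffix) + op + prefix, instead of A's iterative collection of operands into a list and operators into a padded string re-interleaved by a second loop with negative indexing.
import Mathlib
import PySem

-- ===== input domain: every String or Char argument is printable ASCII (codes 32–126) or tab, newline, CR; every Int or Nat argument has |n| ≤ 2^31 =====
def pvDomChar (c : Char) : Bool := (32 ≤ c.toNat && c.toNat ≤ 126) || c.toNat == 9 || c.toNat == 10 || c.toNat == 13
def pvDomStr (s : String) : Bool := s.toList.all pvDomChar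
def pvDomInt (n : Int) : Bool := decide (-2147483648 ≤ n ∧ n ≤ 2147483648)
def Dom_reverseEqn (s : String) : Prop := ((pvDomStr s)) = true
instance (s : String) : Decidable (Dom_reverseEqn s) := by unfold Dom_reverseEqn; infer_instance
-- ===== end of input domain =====

-- B replaces A's two-accumulator scan plus negative-index interleaving loop by a short
-- recursion on the first operator (simpler; same return value everywhere).

-- ===== PORT A =====
-- first loop: state (s1, s2, a); 'i in "+-*/"' is single-char membership, ported as list membership (exact)
def revLoop1 : List Char → List Char → List Char → List (List Char) → List Char × List Char × List (List Char)
  | [], s1, s2, a => (s1, s2, a)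
  | c :: cs, s1, s2, a =>
    if c ∈ ['+', '-', '*', '/'] then revLoop1 cs [] (s2 ++ [c]) (a ++ [s1])
    else revLoop1 cs (s1 ++ [c]) s2 a

def reverseEqn (s : String) : String :=
  let st := revLoop1 s.toList [] ['0'] []
  let s1 := st.1
  let s2 := st.2.1
  let a := st.2.2 ++ [s1]
  -- second loop: s3 += a[-i] + s2[-i]; the indices are always in range (len(a) = len(s2)),
  -- so .getD/.elim never see none; a[0] likewise always exists
  let s3 := (PySem.List.pyRange 1 (a.length : Int) 1).foldl
      (fun s3 i => s3 ++ ((PySem.List.pyGet? a (-i)).getD [])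
                      ++ ((PySem.List.pyGet? s2 (-i)).elim [] (fun ch => [ch]))) []
  String.mk (s3 ++ (PySem.List.pyGet? a 0).getD [])

-- ===== PORT B =====
-- B's 'for k, ch in enumerate(s): if op: return B(s[k+1:]) + ch + s[:k]' — the scan up to
-- the first operator is 'splitFirst' (prefix s[:k], the operator, suffix s[k+1:]); none = no operator
def splitFirst : List Char → Option (List Char × Char × List Char)
  | [] => none
  | c :: cs =>
    if c ∈ ['+', '-', '*', '/'] then some ([], c, cs)
    else (splitFirst cs).map (fun p => (c :: p.1, p.2.1, p.2.2))

lemma splitFirst_lt : ∀ (l p : List Char) (o : Char) (suf : List Char),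
    splitFirst l = some (p, o, suf) → suf.length < l.length := by
  intro l
  induction l with
  | nil => intro p o suf hn; simp [splitFirst] at hn
  | cons c cs ih =>
    intro p o suf h
    by_cases hc : c ∈ ['+', '-', '*', '/']
    · simp [splitFirst, hc] at h
      simp [← h.2.2]
    · simp only [splitFirst, if_neg hc, Option.map_eq_some_iff] at h
      obtain ⟨q, hq, he⟩ := h
      have := ih q.1 q.2.1 q.2.2 (by simpa using hq)
      cases he
      simp only [List.length_cons]
      omega

def altGo (l : List Char) : List Char :=
  match h : splitFirst l with
  | none => l
  | some (p, o, suf) => altGo suf ++ o :: p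
termination_by l.length
decreasing_by exact splitFirst_lt l p o suf h

def reverseEqn_alt (s : String) : String := String.mk (altGo s.toList)

-- ===== PRECONDITION & SPEC =====
def Spec_reverseEqn (s : String) (out : String) : Prop := out = reverseEqn_alt s
instance (s : String) (out : String) : Decidable (Spec_reverseEqn s out) := by unfold Spec_reverseEqn; infer_instance

-- ===== CLAIM (what is proved, stated in full; the proofs are below) =====
def Claim_equal_reverseEqn : Prop := ∀ (s : String), Dom_reverseEqn s → Spec_reverseEqn s (reverseEqn s)

-- ===== LEMMAS AND PROOFS =====

-- proof-only tokenizer: the in-order token list (operands and operators interleaved)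
def tokLoop : List Char → List (List Char) → List Char → List (List Char) × List Char
  | [], toks, cur => (toks, cur)
  | c :: cs, toks, cur =>
    if c ∈ ['+', '-', '*', '/'] then tokLoop cs (toks ++ [cur, [c]]) []
    else tokLoop cs toks (cur ++ [c])

-- interleave operands with operators: [t0, [o1], t1, [o2], …]
def weave : List (List Char) → List Char → List (List Char)
  | t :: ts, o :: os => t :: [o] :: weave ts os
  | _, _ => []

lemma weave_append (a : List (List Char)) (ops : List Char) (t : List Char) (o : Char)
    (h : a.length = ops.length) :
    weave (a ++ [t]) (ops ++ [o]) = weave a ops ++ [t, [o]] := by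
  induction a generalizing ops with
  | nil => cases ops with
    | nil => simp [weave]
    | cons _ _ => simp at h
  | cons x xs ih => cases ops with
    | nil => simp at h
    | cons y ys =>
      simp only [List.cons_append, weave, ih ys (by simpa using h)]

lemma pyGet?_neg_cons {α : Type} (x : α) (xs : List α) (i : Int)
    (h1 : 1 ≤ i) (h2 : i ≤ xs.length) :
    PySem.List.pyGet? (x :: xs) (-i) = PySem.List.pyGet? xs (-i) := by
  have hk : (-i) = -((i.toNat : Nat) : Int) := by omega
  rw [hk, PySem.List.pyGet?_neg_natCast (x :: xs) i.toNat (by omega) (by simp; omega),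
      PySem.List.pyGet?_neg_natCast xs i.toNat (by omega) (by omega)]
  have h3 : (x :: xs).length - i.toNat = (xs.length - i.toNat) + 1 := by
    simp [List.length_cons]; omega
  rw [h3, List.getElem?_cons_succ]

lemma loops_rel (cs : List Char) :
    ∀ (cur : List Char) (z : Char) (ops : List Char) (a : List (List Char)),
    a.length = ops.length →
    ∃ ops', (revLoop1 cs cur (z :: ops) a).2.1 = z :: ops' ∧
            (revLoop1 cs cur (z :: ops) a).2.2.length = ops'.length ∧
            tokLoop cs (weave a ops) cur
              = (weave (revLoop1 cs cur (z :: ops) a).2.2 ops', (revLoop1 cs cur (z :: ops) a).1) := by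
  induction cs with
  | nil => intro cur z ops a h; exact ⟨ops, rfl, h, rfl⟩
  | cons c cs ih =>
    intro cur z ops a h
    by_cases hc : c ∈ ['+', '-', '*', '/']
    · simp only [revLoop1, tokLoop, if_pos hc, List.cons_append]
      have h' : (a ++ [cur]).length = (ops ++ [c]).length := by simp [h]
      obtain ⟨ops', h1, h2, h3⟩ := ih [] z (ops ++ [c]) (a ++ [cur]) h'
      rw [weave_append a ops cur c h] at h3
      exact ⟨ops', h1, h2, h3⟩
    · simp only [revLoop1, tokLoop, if_neg hc]
      exact ih (cur ++ [c]) z ops a h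

-- the second loop of A, interleaving from the back, is exactly reverse-and-flatten of the tokens
lemma second_loop_eq :
    ∀ (ops : List Char) (a : List (List Char)) (cur : List Char) (z : Char),
    a.length = ops.length →
    ((PySem.List.pyRange 1 ((a ++ [cur]).length : Int) 1).foldl
        (fun s3 i => s3 ++ ((PySem.List.pyGet? (a ++ [cur]) (-i)).getD [])
                        ++ ((PySem.List.pyGet? (z :: ops) (-i)).elim [] (fun ch => [ch]))) [])
      ++ (PySem.List.pyGet? (a ++ [cur]) 0).getD []
    = ((weave a ops ++ [cur]).reverse).flatten := by
  intro ops
  induction ops with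
  | nil =>
    intro a cur z h
    have ha : a = [] := by simpa using List.length_eq_zero_iff.mp h
    subst ha
    simp [weave, PySem.List.pyRange_one_eq_nil]
  | cons o ops2 ih =>
    intro a cur z h
    cases a with
    | nil => simp at h
    | cons t a2 =>
      have hn : a2.length = ops2.length := by simpa using h
      set rest := a2 ++ [cur] with hrest
      have hlr : rest.length = a2.length + 1 := by simp [hrest]
      have hls : (o :: ops2).length = a2.length + 1 := by simp [hn]
      have hlen : ((t :: a2 ++ [cur]).length : Int) = ((a2.length + 1 : Nat) : Int) + 1 := by
        push_cast [List.length_append, List.length_cons]; simp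
      have hcongr : (PySem.List.pyRange 1 ((t :: a2 ++ [cur]).length : Int) 1).foldl
          (fun s3 i => s3 ++ ((PySem.List.pyGet? (t :: a2 ++ [cur]) (-i)).getD [])
                          ++ ((PySem.List.pyGet? (z :: o :: ops2) (-i)).elim [] (fun ch => [ch]))) []
        = (PySem.List.pyRange 1 ((t :: a2 ++ [cur]).length : Int) 1).foldl
          (fun s3 i => s3 ++ ((PySem.List.pyGet? rest (-i)).getD [])
                          ++ ((PySem.List.pyGet? (o :: ops2) (-i)).elim [] (fun ch => [ch]))) [] := by
        refine PySem.List.foldl_congr_mem _ _ _ _ ?_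
        intro acc i hi
        rw [PySem.List.mem_pyRange_one] at hi
        have hi2 : i ≤ ((a2.length + 1 : Nat) : Int) := by
          have := hi.2; rw [hlen] at this; omega
        have e1 : PySem.List.pyGet? (t :: a2 ++ [cur]) (-i) = PySem.List.pyGet? rest (-i) := by
          have := pyGet?_neg_cons t rest i hi.1 (by rw [hlr]; exact_mod_cast hi2)
          simpa [hrest] using this
        have e2 : PySem.List.pyGet? (z :: o :: ops2) (-i) = PySem.List.pyGet? (o :: ops2) (-i) := by
          exact pyGet?_neg_cons z (o :: ops2) i hi.1 (by rw [hls]; exact_mod_cast hi2)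
        rw [e1, e2]
      rw [hcongr, hlen,
          PySem.List.pyRange_one_succ_right (a := 1) (b := ((a2.length + 1 : Nat) : Int)) (by omega),
          List.foldl_append]
      have eA : PySem.List.pyGet? rest (-((a2.length + 1 : Nat) : Int)) = rest[0]? := by
        rw [PySem.List.pyGet?_neg_natCast rest (a2.length + 1) (by omega) (by simp [hrest])]
        simp [hlr]
      have eB : PySem.List.pyGet? (o :: ops2) (-((a2.length + 1 : Nat) : Int)) = some o := by
        rw [PySem.List.pyGet?_neg_natCast (o :: ops2) (a2.length + 1) (by omega) (by simp [hn])]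
        simp [List.length_cons, hn]
      simp only [List.foldl_cons, List.foldl_nil, eA, eB, Option.elim_some]
      have hIH := ih a2 cur o hn
      rw [show ((a2 ++ [cur]).length : Int) = ((a2.length + 1 : Nat) : Int) by simp] at hIH
      rw [PySem.List.pyGet?_zero] at hIH
      have hA0 : PySem.List.pyGet? (t :: a2 ++ [cur]) 0 = some t := by
        exact PySem.List.pyGet?_zero_cons t (a2 ++ [cur])
      rw [hA0]
      calc ((PySem.List.pyRange 1 ((a2.length + 1 : Nat) : Int) 1).foldl
              (fun s3 i => s3 ++ ((PySem.List.pyGet? rest (-i)).getD [])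
                              ++ ((PySem.List.pyGet? (o :: ops2) (-i)).elim [] (fun ch => [ch]))) []
              ++ (rest[0]?).getD [] ++ [o]) ++ (some t).getD []
          = (((weave a2 ops2 ++ [cur]).reverse).flatten ++ [o]) ++ t := by
            rw [← hIH]; simp [hrest]
        _ = ((weave (t :: a2) (o :: ops2) ++ [cur]).reverse).flatten := by
            simp [weave, List.flatten_append]

-- B-side bridge lemmas: tokLoop's accumulator is a prefix; splitFirst drives tokLoop
lemma tokLoop_toks_prefix : ∀ (cs : List Char) (t0 toks cur : _),
    tokLoop cs (t0 ++ toks) cur = (t0 ++ (tokLoop cs toks cur).1, (tokLoop cs toks cur).2) := by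
  intro cs
  induction cs with
  | nil => intro t0 toks cur; rfl
  | cons c cs ih =>
    intro t0 toks cur
    by_cases hc : c ∈ ['+', '-', '*', '/']
    · simp only [tokLoop, if_pos hc, List.append_assoc, ih]
    · simp only [tokLoop, if_neg hc, ih]

lemma tokLoop_of_splitFirst_none : ∀ (cs : List Char), splitFirst cs = none →
    ∀ toks cur, tokLoop cs toks cur = (toks, cur ++ cs) := by
  intro cs
  induction cs with
  | nil => intro _ toks cur; simp [tokLoop]
  | cons c cs ih =>
    intro h toks cur
    by_cases hc : c ∈ ['+', '-', '*', '/']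
    · simp [splitFirst, hc] at h
    · simp only [splitFirst, if_neg hc, Option.map_eq_none_iff] at h
      simp only [tokLoop, if_neg hc, ih h]
      simp

lemma tokLoop_of_splitFirst_some : ∀ (cs p : List Char) (o : Char) (suf : List Char),
    splitFirst cs = some (p, o, suf) →
    ∀ toks cur, tokLoop cs toks cur = tokLoop suf (toks ++ [cur ++ p, [o]]) [] := by
  intro cs
  induction cs with
  | nil => intro p o suf h; simp [splitFirst] at h
  | cons c cs ih =>
    intro p o suf h toks cur
    by_cases hc : c ∈ ['+', '-', '*', '/']
    · simp [splitFirst, hc] at h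
      obtain ⟨hp, ho, hs⟩ := h
      subst hp; subst ho; subst hs
      simp [tokLoop, hc]
    · simp only [splitFirst, if_neg hc, Option.map_eq_some_iff] at h
      obtain ⟨⟨p', o', suf'⟩, hq, he⟩ := h
      cases he
      simp only [tokLoop, if_neg hc, ih p' o' suf' hq]
      simp

-- altGo computes reverse-and-flatten of the token list
lemma altGo_eq_tok : ∀ (l : List Char),
    altGo l = (((tokLoop l [] []).1 ++ [(tokLoop l [] []).2]).reverse).flatten := by
  intro l
  induction l using altGo.induct with
  | case1 l h =>
    rw [altGo, h, tokLoop_of_splitFirst_none l h]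
    simp
  | case2 l p o suf h ih =>
    rw [altGo, h, tokLoop_of_splitFirst_some l p o suf h [] []]
    simp only [List.nil_append]
    have h5 : tokLoop suf [p, [o]] [] = ([p, [o]] ++ (tokLoop suf [] []).1, (tokLoop suf [] []).2) := by
      simpa using tokLoop_toks_prefix suf [p, [o]] [] []
    rw [h5, ih]
    simp [List.flatten_append]

-- ===== VERDICT (by name: the statement is the Claim_ definition above) =====
theorem reverseEqn_spec : Claim_equal_reverseEqn := by
  intro s _
  unfold Spec_reverseEqn reverseEqn reverseEqn_alt
  obtain ⟨ops', h1, h2, h3⟩ := loops_rel s.toList [] '0' [] [] rfl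
  simp only [weave] at h3
  refine congrArg String.mk ?_
  rw [altGo_eq_tok, h3]
  simp only [h1]
  exact second_loop_eq ops' (revLoop1 s.toList [] ['0'] []).2.2
    (revLoop1 s.toList [] ['0'] []).1 '0' h2
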